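-- pv_equiv track=rewrite | github.com/kristinamancini/CodingPractice | Python/beginner exercises/pracpyex23.py | find
-- ===== SOURCE A (Python) =====
-- def find(a, b):
--     c = []
--     for elem in a:
--         if elem in b:
--             if elem not in c:
--                 c.append(elem)
--         else:
--             continue
--     return c
-- ===== SOURCE B (Python) =====
-- def find(a, b):
--     # Traverse a BACKWARDS, building the answer back-to-front: prepend each
--     # element of b and delete any later copy of it already in the result.
--     res = []
--     for x in reversed(a):
--         if x in b:
--             res = [x] + [y for y in res if y != x]
--     return res
-- ===== Notes on version B (the rewrite author's own statement) =====
-- stated objective: alternative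
-- what changed: Replaces A's forward loop that appends to an accumulator guarded by a membership test with a backward traversal that builds the result back-to-front, prepending each element of b and deleting later copies of it from the partial result instead of testing membership.
import Mathlib
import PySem

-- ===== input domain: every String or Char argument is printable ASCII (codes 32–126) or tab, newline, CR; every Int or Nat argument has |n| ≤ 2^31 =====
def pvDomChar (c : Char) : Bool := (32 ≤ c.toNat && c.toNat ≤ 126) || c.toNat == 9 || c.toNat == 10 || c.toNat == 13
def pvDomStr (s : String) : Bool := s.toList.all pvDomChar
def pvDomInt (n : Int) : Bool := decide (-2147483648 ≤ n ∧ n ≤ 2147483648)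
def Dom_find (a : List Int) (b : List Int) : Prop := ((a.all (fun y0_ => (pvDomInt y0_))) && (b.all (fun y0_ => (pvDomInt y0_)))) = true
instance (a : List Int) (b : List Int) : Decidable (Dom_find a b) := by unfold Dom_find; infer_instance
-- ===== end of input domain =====

-- B builds the answer back-to-front over a reversed traversal (prepend + delete later copies) instead of A's forward accumulator loop; same cost, return value only.

-- ===== PORT A =====
-- A's loop: for elem in a: if elem in b: if elem not in c: c.append(elem)
def findLoop (xs : List Int) (b : List Int) (c : List Int) : List Int :=
  match xs with
  | [] => c
  | x :: rest =>
      if x ∈ b then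
        if x ∈ c then findLoop rest b c
        else findLoop rest b (c ++ [x])
      else findLoop rest b c

def find (a : List Int) (b : List Int) : List Int := findLoop a b []

-- ===== PORT B =====
-- for x in reversed(a): if x in b: res = [x] + [y for y in res if y != x]
def find_alt (a : List Int) (b : List Int) : List Int :=
  a.reverse.foldl
    (fun res x => if x ∈ b then [x] ++ res.filter (fun y => decide (y ≠ x)) else res) []

-- ===== PRECONDITION & SPEC =====
def Spec_find (a : List Int) (b : List Int) (out : List Int) : Prop := out = find_alt a b
instance (a : List Int) (b : List Int) (out : List Int) : Decidable (Spec_find a b out) := by unfold Spec_find; infer_instance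

-- ===== CLAIM (what is proved, stated in full; the proofs are below) =====
def Claim_equal_find : Prop := ∀ (a : List Int) (b : List Int), Dom_find a b → Spec_find a b (find a b)

-- ===== LEMMAS AND PROOFS =====
-- Structural reference version: distinct elements of a that are in b, in first-occurrence order.
def refFind (xs : List Int) (b : List Int) : List Int :=
  match xs with
  | [] => []
  | x :: rest =>
      if x ∈ b then [x] ++ (refFind rest b).filter (fun y => decide (y ≠ x))
      else refFind rest b

theorem find_alt_eq_ref (a b : List Int) : find_alt a b = refFind a b := by
  unfold find_alt
  rw [List.foldl_reverse]
  induction a with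
  | nil => rfl
  | cons x rest ih =>
    simp only [List.foldr, refFind]
    rw [ih]

theorem findLoop_eq_ref (xs b : List Int) (c : List Int) :
    findLoop xs b c = c ++ (refFind xs b).filter (fun y => decide (y ∉ c)) := by
  induction xs generalizing c with
  | nil => simp [findLoop, refFind]
  | cons x rest ih =>
    simp only [findLoop, refFind]
    by_cases hb : x ∈ b
    · by_cases hc : x ∈ c
      · rw [if_pos hb, if_pos hb, if_pos hc, ih]
        congr 1
        simp only [List.singleton_append, List.filter_cons, List.filter_filter]
        have hx : (decide (x ∉ c)) = false := by simpa using hc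
        rw [hx]
        simp only [Bool.false_eq_true, if_false]
        apply List.filter_congr
        intro y _
        by_cases hyx : y = x
        · subst hyx; simp [hc]
        · simp [hyx]
      · rw [if_pos hb, if_pos hb, if_neg hc, ih]
        simp only [List.singleton_append, List.filter_cons, List.filter_filter]
        have hx2 : (decide (x ∉ c)) = true := by simpa using hc
        rw [hx2]
        simp only [if_true, List.append_assoc, List.singleton_append]
        congr 2
        apply List.filter_congr
        intro y _
        by_cases hyx : y = x
        · subst hyx; simp
        · simp [hyx, List.mem_append]
    · rw [if_neg hb, if_neg hb, ih]

-- ===== VERDICT (by name: the statement is the Claim_ definition above) =====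
theorem find_spec : Claim_equal_find := by
  intro a b _
  unfold Spec_find find
  rw [find_alt_eq_ref, findLoop_eq_ref]
  simp
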